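-- pv_equiv track=rewrite | github.com/kemechedzhiev/CodingamePuzzles | easy/create_the_longest_sequence_of_ones.py | length_of_the_longest_sequence_in_bitstring
-- ===== SOURCE A (Python) =====
-- def length_of_the_longest_sequence_in_bitstring(text):
--     temp_result = text.split('0')
--     max_sequence, temp_sum, last_element = 0, 0, 0
--     for entry in temp_result:
--         temp_sum = len(entry) + last_element + 1
--         max_sequence = max(max_sequence, temp_sum)
--         last_element = len(entry)
--     return max_sequence
-- ===== SOURCE B (Python) =====
-- def length_of_the_longest_sequence_in_bitstring(text):
--     cur = prev = best = 0
--     for ch in text: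
--         if ch == '0':
--             best = max(best, prev + cur + 1)
--             prev, cur = cur, 0
--         else:
--             cur += 1
--     return max(best, prev + cur + 1)
-- ===== Notes on version B (the rewrite author's own statement) =====
-- stated objective: simpler
-- what changed: B replaces A's split-on-zero-then-fold-over-pieces with a single character scan maintaining (cur, prev, best), never materialising the list of pieces.
import Mathlib
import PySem

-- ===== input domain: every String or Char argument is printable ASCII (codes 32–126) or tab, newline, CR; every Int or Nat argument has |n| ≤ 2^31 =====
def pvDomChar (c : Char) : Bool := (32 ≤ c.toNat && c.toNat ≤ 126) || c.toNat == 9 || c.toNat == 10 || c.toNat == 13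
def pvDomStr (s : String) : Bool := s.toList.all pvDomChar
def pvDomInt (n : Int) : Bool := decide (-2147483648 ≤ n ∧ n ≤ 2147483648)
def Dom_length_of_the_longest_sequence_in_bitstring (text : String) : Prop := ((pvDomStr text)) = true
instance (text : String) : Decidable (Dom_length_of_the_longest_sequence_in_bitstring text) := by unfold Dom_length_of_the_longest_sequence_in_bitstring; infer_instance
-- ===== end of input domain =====

-- B fuses A's split('0')-then-fold into one character scan over the string (simpler; no list of pieces).


-- ===== PORT A =====
def length_of_the_longest_sequence_in_bitstring (text : String) : Int :=
  let temp_result := (PySem.Str.split? text "0").getD []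
  let st := temp_result.foldl
    (fun (st : Int × Int) entry =>
      let temp_sum : Int := (PySem.Str.len entry : Int) + st.2 + 1
      (max st.1 temp_sum, (PySem.Str.len entry : Int)))
    (0, 0)
  st.1

-- ===== PORT B =====
def length_of_the_longest_sequence_in_bitstring_alt (text : String) : Int :=
  let st := text.toList.foldl
    (fun (s : Int × Int × Int) ch =>
      if ch = '0' then (0, s.1, max s.2.2 (s.2.1 + s.1 + 1)) else (s.1 + 1, s.2))
    (0, 0, 0)
  max st.2.2 (st.2.1 + st.1 + 1)

-- ===== PRECONDITION & SPEC =====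
def Spec_length_of_the_longest_sequence_in_bitstring (text : String) (out : Int) : Prop := out = length_of_the_longest_sequence_in_bitstring_alt text
instance (text : String) (out : Int) : Decidable (Spec_length_of_the_longest_sequence_in_bitstring text out) := by unfold Spec_length_of_the_longest_sequence_in_bitstring; infer_instance

-- ===== CLAIM (what is proved, stated in full; the proofs are below) =====
def Claim_equal_length_of_the_longest_sequence_in_bitstring : Prop := ∀ (text : String), Dom_length_of_the_longest_sequence_in_bitstring text → Spec_length_of_the_longest_sequence_in_bitstring text (length_of_the_longest_sequence_in_bitstring text)

-- ===== LEMMAS AND PROOFS =====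

/-- Lengths of the '0'-separated pieces of a character list. -/
def pvRuns : List Char → List Nat
  | [] => [0]
  | c :: rest =>
    if c = '0' then 0 :: pvRuns rest
    else match pvRuns rest with
      | [] => [1]
      | h :: t => (h + 1) :: t

/-- Add `k` to the head of a length list. -/
def pvConsH (k : Nat) : List Nat → List Nat
  | [] => [k]
  | h :: t => (k + h) :: t

lemma pvRuns_ne_nil (l : List Char) : pvRuns l ≠ [] := by
  cases l with
  | nil => simp [pvRuns]
  | cons c rest =>
    simp only [pvRuns]
    split
    · simp
    · split <;> simp

lemma pvConsH_zero (l : List Char) : pvConsH 0 (pvRuns l) = pvRuns l := by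
  cases h : pvRuns l with
  | nil => exact absurd h (pvRuns_ne_nil l)
  | cons a t => simp [pvConsH]

/-- A's fold, abstracted to the piece lengths. -/
def pvFoldA (ns : List Nat) (best last : Int) : Int :=
  (ns.foldl (fun (p : Int × Int) (n : Nat) => (max p.1 ((n : Int) + p.2 + 1), (n : Int))) (best, last)).1

lemma go_len : ∀ (fuel : Nat) (l cur : List Char) (acc : List (List Char)),
    l.length < fuel →
    (PySem.Chars.splitOn.go ['0'] fuel l cur acc).map List.length
      = acc.reverse.map List.length ++ pvConsH cur.length (pvRuns l) := by
  intro fuel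
  induction fuel with
  | zero => intro l cur acc h; omega
  | succ f ih =>
    intro l cur acc h
    cases l with
    | nil =>
      simp [PySem.Chars.splitOn.go, pvRuns, pvConsH]
    | cons c rest =>
      by_cases hc : c = '0'
      · subst hc
        have hgo : PySem.Chars.splitOn.go ['0'] (f + 1) ('0' :: rest) cur acc
            = PySem.Chars.splitOn.go ['0'] f rest [] (cur.reverse :: acc) := by
          simp [PySem.Chars.splitOn.go]
        rw [hgo, ih rest [] (cur.reverse :: acc) (by simpa using Nat.lt_of_succ_lt_succ h)]
        simp only [pvRuns, pvConsH, List.length_nil, List.reverse_cons,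
          List.map_append, List.map_cons, List.map_nil, List.append_assoc, List.length_reverse]
        cases hr : pvRuns rest with
        | nil => exact absurd hr (pvRuns_ne_nil rest)
        | cons a t => simp
      · have hgo : PySem.Chars.splitOn.go ['0'] (f + 1) (c :: rest) cur acc
            = PySem.Chars.splitOn.go ['0'] f rest (c :: cur) acc := by
          simp [PySem.Chars.splitOn.go, List.isPrefixOf]
          intro h'; exact absurd h'.symm hc
        rw [hgo, ih rest (c :: cur) acc (by simpa using Nat.lt_of_succ_lt_succ h)]
        cases hr : pvRuns rest with
        | nil => exact absurd hr (pvRuns_ne_nil rest)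
        | cons a t =>
          simp only [pvRuns, hc, hr, List.length_cons, pvConsH]
          congr 2
          omega

def pvStepB (s : Int × Int × Int) (ch : Char) : Int × Int × Int :=
  if ch = '0' then (0, s.1, max s.2.2 (s.2.1 + s.1 + 1)) else (s.1 + 1, s.2)

def pvFinB (s : Int × Int × Int) : Int := max s.2.2 (s.2.1 + s.1 + 1)

lemma scan_eq : ∀ (l : List Char) (cur : Nat) (prev best : Int),
    pvFinB (l.foldl pvStepB ((cur : Int), prev, best))
      = pvFoldA (pvConsH cur (pvRuns l)) best prev := by
  intro l
  induction l with
  | nil =>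
    intro cur prev best
    simp only [List.foldl_nil, pvFinB, pvRuns, pvConsH, pvFoldA, List.foldl_cons, List.foldl_nil]
    simp only [Nat.add_zero]
    rw [show (cur : Int) + prev + 1 = prev + (cur : Int) + 1 from by ring]
  | cons c rest ih =>
    intro cur prev best
    by_cases hc : c = '0'
    · subst hc
      have key := ih 0 (cur : Int) (max best (prev + (cur : Int) + 1))
      simp only [Nat.cast_zero, pvConsH_zero] at key
      rw [List.foldl_cons]
      have hstep : pvStepB ((cur : Int), prev, best) '0'
          = ((0 : Int), (cur : Int), max best (prev + (cur : Int) + 1)) := by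
        simp [pvStepB]
      rw [hstep, key]
      have hru : pvConsH cur (pvRuns ('0' :: rest)) = cur :: pvRuns rest := by
        simp [pvRuns, pvConsH]
      rw [hru]
      simp only [pvFoldA, List.foldl_cons]
      rw [show (cur : Int) + prev + 1 = prev + (cur : Int) + 1 from by ring]
    · rw [List.foldl_cons]
      have hstep : pvStepB ((cur : Int), prev, best) c = (((cur + 1 : Nat) : Int), prev, best) := by
        simp [pvStepB, hc]
      rw [hstep, ih (cur + 1) prev best]
      cases hr : pvRuns rest with
      | nil => exact absurd hr (pvRuns_ne_nil rest)
      | cons a t =>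
        have hru : pvConsH cur (pvRuns (c :: rest)) = (cur + (a + 1)) :: t := by
          simp [pvRuns, hc, hr, pvConsH]
        have hlu : pvConsH (cur + 1) (a :: t) = (cur + 1 + a) :: t := rfl
        rw [hru, hlu, show cur + 1 + a = cur + (a + 1) from by omega]

-- ===== VERDICT (by name: the statement is the Claim_ definition above) =====
lemma splitOn_len (l : List Char) :
    (PySem.Chars.splitOn l ['0']).map List.length = pvRuns l := by
  have h := go_len (l.length + 1) l [] [] (Nat.lt_succ_self _)
  simpa [PySem.Chars.splitOn, pvConsH_zero] using h

theorem length_of_the_longest_sequence_in_bitstring_spec : Claim_equal_length_of_the_longest_sequence_in_bitstring := by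
  intro text _
  unfold Spec_length_of_the_longest_sequence_in_bitstring
  obtain ⟨ps, hps, hmap⟩ : ∃ ps, PySem.Str.split? text "0" = some ps ∧
      ps.map String.toList = PySem.Chars.splitOn text.toList ['0'] := by
    have h := PySem.Str.split?_map text "0"
    cases hs : PySem.Str.split? text "0" with
    | none => rw [hs] at h; simp [PySem.Chars.split?] at h
    | some ps =>
      refine ⟨ps, rfl, ?_⟩
      rw [hs] at h
      simpa [PySem.Chars.split?] using h
  have hA : length_of_the_longest_sequence_in_bitstring text
      = pvFoldA (pvRuns text.toList) 0 0 := by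
    rw [← splitOn_len, ← hmap]
    simp only [length_of_the_longest_sequence_in_bitstring, hps, Option.getD_some, pvFoldA,
      List.map_map, List.foldl_map, Function.comp]
    simp [PySem.Str.len]
  have hB : length_of_the_longest_sequence_in_bitstring_alt text
      = pvFoldA (pvRuns text.toList) 0 0 := by
    have h := scan_eq text.toList 0 0 0
    simp only [Nat.cast_zero, pvConsH_zero] at h
    simpa [length_of_the_longest_sequence_in_bitstring_alt, pvFinB, pvStepB] using h
  rw [hA, hB]
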